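-- pv_equiv track=rewrite | github.com/yyyuanfish/russia-ukrain-war | pipeline_v2/visualization.py | _ordered_hints
-- ===== SOURCE A (Python) =====
-- from typing import Callable, Dict, List, Optional, Set
--
-- DEFAULT_HINT_ORDER = ["person", "event", "organization", "policy", "media_narrative", "unknown"]
--
-- def _ordered_hints(observed: Set[str]) -> List[str]:
--     out: List[str] = []
--     for h in DEFAULT_HINT_ORDER:
--         if h in observed:
--             out.append(h)
--     rest = sorted(h for h in observed if h not in set(DEFAULT_HINT_ORDER))
--     out.extend(rest)
--     return out
-- ===== SOURCE B (Python) =====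
-- # B: one sorted() pass with key (priority index or fallback rank, name) instead of A's priority loop + separate sort.
-- DEFAULT_HINT_ORDER = ["person", "event", "organization", "policy", "media_narrative", "unknown"]
--
-- def _ordered_hints(observed):
--     index = {h: i for i, h in enumerate(DEFAULT_HINT_ORDER)}
--     fallback = len(DEFAULT_HINT_ORDER)
--     return sorted(observed, key=lambda h: (index.get(h, fallback), h))
-- ===== Notes on version B (the rewrite author's own statement) =====
-- stated objective: simpler
-- what changed: Replaces A's two phases (scan of DEFAULT_HINT_ORDER appending present hints, then a separate sort of the rest) with a single sorted() over observed using the key (priority index with fallback rank len(DEFAULT_HINT_ORDER), hint string).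
import Mathlib
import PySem

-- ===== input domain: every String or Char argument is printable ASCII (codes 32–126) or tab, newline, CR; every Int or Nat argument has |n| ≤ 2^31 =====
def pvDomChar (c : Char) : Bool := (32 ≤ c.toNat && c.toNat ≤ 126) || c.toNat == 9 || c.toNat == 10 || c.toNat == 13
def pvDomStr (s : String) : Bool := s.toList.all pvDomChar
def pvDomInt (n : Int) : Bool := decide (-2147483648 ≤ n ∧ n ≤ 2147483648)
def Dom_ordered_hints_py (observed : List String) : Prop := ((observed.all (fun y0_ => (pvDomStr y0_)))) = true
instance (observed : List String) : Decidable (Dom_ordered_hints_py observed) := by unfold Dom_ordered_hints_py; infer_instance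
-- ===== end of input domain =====

-- B replaces A's two phases (priority scan + separate sort of the rest) with one sorted() pass keyed by
-- (priority index with fallback rank, hint); equivalence proved for duplicate-free inputs (observed is a Python set).


-- ===== PORT A =====
-- DEFAULT_HINT_ORDER (module constant, shared by both ports)
def pvDefaultHintOrder : List String := ["person", "event", "organization", "policy", "media_narrative", "unknown"]

def ordered_hints_py (observed : List String) : List String :=
  -- out = []; for h in DEFAULT_HINT_ORDER: if h in observed: out.append(h)
  let out : List String := pvDefaultHintOrder.foldl (fun acc h => if observed.contains h then acc ++ [h] else acc) []
  -- rest = sorted(h for h in observed if h not in set(DEFAULT_HINT_ORDER)); out.extend(rest)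
  let rest : List String := PySem.List.sorted (observed.filter (fun h => !((PySem.Set.ofList pvDefaultHintOrder).contains h))) (fun h => h) false
  out ++ rest

-- ===== PORT B =====
-- index = {h: i for i, h in enumerate(DEFAULT_HINT_ORDER)}
def pvHintIndex : PySem.Dict String Int :=
  (PySem.List.enumerate pvDefaultHintOrder 0).foldl (fun d p => PySem.Dict.insert d p.2 p.1) PySem.Dict.empty

-- the key's first component: index.get(h, fallback) with fallback = len(DEFAULT_HINT_ORDER)
def pvRank (h : String) : Int := PySem.Dict.getD pvHintIndex h ((pvDefaultHintOrder.length : Int))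

def ordered_hints_py_alt (observed : List String) : List String :=
  -- sorted(observed, key=lambda h: (index.get(h, fallback), h))
  PySem.List.sorted2 observed pvRank (fun h => h) false

-- ===== PRECONDITION & SPEC =====
-- observed models a Python set[str] (the type convention: a list of DISTINCT elements); Pre_ excludes
-- lists with duplicate entries, which represent no set input of A.
def Pre_ordered_hints_py (observed : List String) : Prop := observed.Nodup
instance (observed : List String) : Decidable (Pre_ordered_hints_py observed) := by unfold Pre_ordered_hints_py; infer_instance
def pvWitness_ordered_hints_py : List String := ["zebra", "event", "person", "alpha"]
def Spec_ordered_hints_py (observed : List String) (out : List String) : Prop := out = ordered_hints_py_alt observed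
instance (observed : List String) (out : List String) : Decidable (Spec_ordered_hints_py observed out) := by unfold Spec_ordered_hints_py; infer_instance

-- ===== CLAIM (what is proved, stated in full; the proofs are below) =====
def Claim_equal_ordered_hints_py : Prop := ∀ (observed : List String), Dom_ordered_hints_py observed → Pre_ordered_hints_py observed → Spec_ordered_hints_py observed (ordered_hints_py observed)

-- ===== LEMMAS AND PROOFS =====

-- B's sorted2 with tuple key (pvRank h, h) is sorted with the lexicographic key into Lex (Int × String).
theorem sorted2_eq_sorted_lex {α : Type} (xs : List α) (k1 : α → Int) (k2 : α → String) :
    PySem.List.sorted2 xs k1 k2 false = PySem.List.sorted xs (fun x => toLex (k1 x, k2 x)) false := by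
  rw [PySem.List.sorted_eq_foldl_insertBy]
  show List.foldl _ [] xs = _
  congr 1
  funext acc x
  congr 1
  funext a b
  rcases lt_trichotomy (k1 a) (k1 b) with h | h | h <;>
    simp [Prod.Lex.lt_iff, h, lt_asymm]

-- a hint outside DEFAULT_HINT_ORDER gets the fallback rank 6 = len(DEFAULT_HINT_ORDER)
theorem rank_not_mem {h : String} (hh : h ∉ pvDefaultHintOrder) : pvRank h = 6 := by
  simp [pvDefaultHintOrder] at hh
  obtain ⟨h1, h2, h3, h4, h5, h6⟩ := hh
  simp [pvRank, pvHintIndex, pvDefaultHintOrder, PySem.List.enumerate, List.foldl,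
    PySem.Dict.getD_insert, PySem.Dict.getD_empty, h1, h2, h3, h4, h5, h6]

theorem ordered_hints_main (observed : List String) (hnd : observed.Nodup) :
    ordered_hints_py observed = ordered_hints_py_alt observed := by
  unfold ordered_hints_py ordered_hints_py_alt
  rw [sorted2_eq_sorted_lex]
  rw [PySem.List.foldl_append_if_eq_filter]
  rw [show PySem.Set.ofList pvDefaultHintOrder = pvDefaultHintOrder from by decide]
  simp only [List.nil_append, PySem.Set.contains]
  set key : String → Lex (Int × String) := fun x => toLex (pvRank x, x) with hkey
  apply (PySem.List.sorted_eq_of_perm_of_pairwise_lt _ _ _ ?_ ?_).symm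
  · -- A's output is a permutation of observed
    have p1 : (pvDefaultHintOrder.filter (fun h => observed.contains h)).Perm
        (observed.filter (fun h => pvDefaultHintOrder.contains h)) := by
      rw [List.perm_ext_iff_of_nodup (List.Nodup.filter _ (by decide)) (List.Nodup.filter _ hnd)]
      intro a
      simp [List.mem_filter, and_comm]
    have p2 : (PySem.List.sorted (observed.filter (fun h => !(pvDefaultHintOrder.contains h))) (fun h => h) false).Perm
        (observed.filter (fun h => !(pvDefaultHintOrder.contains h))) := PySem.List.sorted_perm _ _ _
    exact (p1.append p2).trans (List.filter_append_perm _ _)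
  · -- A's output is strictly increasing under key
    rw [List.pairwise_append]
    refine ⟨?_, ?_, ?_⟩
    · refine List.Pairwise.imp ?_ (List.Pairwise.filter _ (show pvDefaultHintOrder.Pairwise (fun a b => pvRank a < pvRank b) from by decide))
      intro a b hab
      exact Prod.Lex.lt_iff.mpr (Or.inl hab)
    · have hsle := PySem.List.sorted_pairwise (observed.filter (fun h => !(pvDefaultHintOrder.contains h))) (fun h => h)
      have hsnd : (PySem.List.sorted (observed.filter (fun h => !(pvDefaultHintOrder.contains h))) (fun h => h) false).Nodup :=
        ((PySem.List.sorted_perm _ _ _).nodup_iff).mpr (List.Nodup.filter _ hnd)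
      have := hsle.and hsnd
      refine List.Pairwise.imp_of_mem ?_ this
      intro a b ha hb hab
      have hma : a ∉ pvDefaultHintOrder := by
        simp [PySem.List.mem_sorted, List.mem_filter] at ha
        exact ha.2
      have hmb : b ∉ pvDefaultHintOrder := by
        simp [PySem.List.mem_sorted, List.mem_filter] at hb
        exact hb.2
      refine Prod.Lex.lt_iff.mpr (Or.inr ⟨?_, ?_⟩)
      · show pvRank a = pvRank b
        rw [rank_not_mem hma, rank_not_mem hmb]
      · exact lt_of_le_of_ne hab.1 hab.2
    · intro a ha b hb
      have hma : a ∈ pvDefaultHintOrder := (List.mem_filter.mp ha).1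
      have hmb : b ∉ pvDefaultHintOrder := by
        simp [PySem.List.mem_sorted, List.mem_filter] at hb
        exact hb.2
      refine Prod.Lex.lt_iff.mpr (Or.inl ?_)
      show pvRank a < pvRank b
      rw [rank_not_mem hmb]
      exact (show ∀ h ∈ pvDefaultHintOrder, pvRank h < 6 from by decide) a hma

-- ===== VERDICT (by name: the statement is the Claim_ definition above) =====
theorem ordered_hints_py_spec : Claim_equal_ordered_hints_py := by
  intro observed _ hpre
  exact ordered_hints_main observed hpre
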